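-- pv_equiv track=rewrite | github.com/dgoldsb/advent-of-code-2018 | day-1/problem_1.py | get_chardiff
-- ===== SOURCE A (Python) =====
-- def get_chardiff(v1, v2):
--     diff = 0
--     common = ''
--     for counter, value in enumerate(v1):
--         if value != v2[counter]:
--             diff += 1
--         else:
--             common += value
--     return diff, common
-- ===== SOURCE B (Python) =====
-- def get_chardiff(v1, v2):
--     # Divide and conquer over index intervals: solve [lo, hi) by splitting at the
--     # midpoint and combining (diff_left + diff_right, common_left + common_right).
--     def solve(lo, hi):
--         if hi - lo <= 0:
--             return 0, ''
--         if hi - lo == 1: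
--             if v1[lo] == v2[lo]:
--                 return 0, v1[lo]
--             return 1, ''
--         mid = (lo + hi) // 2
--         d1, c1 = solve(lo, mid)
--         d2, c2 = solve(mid, hi)
--         return d1 + d2, c1 + c2
--     return solve(0, len(v1))
-- ===== Notes on version B (the rewrite author's own statement) =====
-- stated objective: alternative
-- what changed: B solves the problem by divide and conquer: it recursively splits the index interval at the midpoint, solving each half independently and combining results as (diff_left + diff_right, common_left + common_right), instead of A's single left-to-right accumulator loop.
import Mathlib
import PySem

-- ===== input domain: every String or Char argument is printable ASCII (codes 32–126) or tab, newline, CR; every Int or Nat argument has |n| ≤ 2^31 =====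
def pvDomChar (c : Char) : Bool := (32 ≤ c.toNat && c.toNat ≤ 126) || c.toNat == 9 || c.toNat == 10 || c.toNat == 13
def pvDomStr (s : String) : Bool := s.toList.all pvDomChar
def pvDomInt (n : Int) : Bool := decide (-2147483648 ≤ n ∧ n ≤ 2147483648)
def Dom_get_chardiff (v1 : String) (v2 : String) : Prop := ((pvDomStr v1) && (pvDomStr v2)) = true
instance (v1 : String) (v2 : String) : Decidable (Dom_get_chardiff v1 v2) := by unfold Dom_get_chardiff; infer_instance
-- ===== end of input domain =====

-- B replaces A's single left-to-right accumulator loop by a divide-and-conquer recursion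
-- on index intervals, combining (diff, common) pairs of the two halves (alternative).

-- ===== PORT A =====
-- A: diff/common accumulator loop over enumerate(v1); v2[counter] via pyGetD (in range under Pre_).
def get_chardiff (v1 : String) (v2 : String) : Int × String :=
  let l2 := v2.toList
  let r := (PySem.List.enumerate v1.toList 0).foldl
    (fun (st : Int × List Char) cv =>
      if cv.2 ≠ PySem.List.pyGetD l2 cv.1 ' ' then (st.1 + 1, st.2)
      else (st.1, st.2 ++ [cv.2]))
    (0, [])
  (r.1, String.ofList r.2)

-- ===== PORT B =====
-- B's inner solve(lo, hi): split the interval at mid = (lo+hi)//2, combine the halves.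
-- (fuel = an upper bound on hi - lo, only to make the recursion structural; never hit)
def pvSolve (l1 l2 : List Char) : Nat → Nat → Nat → Int × List Char
  | 0, _, _ => (0, [])
  | fuel + 1, lo, hi =>
    if hi ≤ lo then (0, [])
    else if hi = lo + 1 then
      let a := PySem.List.pyGetD l1 (lo : Int) ' '
      if a = PySem.List.pyGetD l2 (lo : Int) ' ' then (0, [a]) else (1, [])
    else
      let mid := (lo + hi) / 2
      let r1 := pvSolve l1 l2 fuel lo mid
      let r2 := pvSolve l1 l2 fuel mid hi
      (r1.1 + r2.1, r1.2 ++ r2.2)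

def get_chardiff_alt (v1 : String) (v2 : String) : Int × String :=
  let l1 := v1.toList
  let n := l1.length
  let r := pvSolve l1 v2.toList n 0 n
  (r.1, String.ofList r.2)

-- ===== PRECONDITION & SPEC =====
-- Pre_ excludes exactly the inputs where A (and B) raise IndexError: v2 shorter than v1.
def Pre_get_chardiff (v1 : String) (v2 : String) : Prop := v1.toList.length ≤ v2.toList.length
instance (v1 : String) (v2 : String) : Decidable (Pre_get_chardiff v1 v2) := by unfold Pre_get_chardiff; infer_instance
def pvWitness_get_chardiff : String × String := ("abc", "axc")

def Spec_get_chardiff (v1 : String) (v2 : String) (out : Int × String) : Prop := out = get_chardiff_alt v1 v2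
instance (v1 : String) (v2 : String) (out : Int × String) : Decidable (Spec_get_chardiff v1 v2 out) := by unfold Spec_get_chardiff; infer_instance

-- ===== CLAIM (what is proved, stated in full; the proofs are below) =====
def Claim_equal_get_chardiff : Prop := ∀ (v1 : String) (v2 : String), Dom_get_chardiff v1 v2 → Pre_get_chardiff v1 v2 → Spec_get_chardiff v1 v2 (get_chardiff v1 v2)

-- ===== LEMMAS AND PROOFS =====

-- the common subsequence of matching characters, position by position
def pvMatches : List Char → List Char → List Char
  | x :: xs, y :: ys => if x = y then x :: pvMatches xs ys else pvMatches xs ys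
  | _, _ => []

-- A's fold computes (d + (len - |matches|), c ++ matches) on the tail starting at s
theorem pvFoldA (l1 l2 : List Char) (s : Nat) (d : Int) (c : List Char)
    (h : s + l1.length ≤ l2.length) :
    (PySem.List.enumerate l1 (s : Int)).foldl
      (fun (st : Int × List Char) cv =>
        if cv.2 ≠ PySem.List.pyGetD l2 cv.1 ' ' then (st.1 + 1, st.2)
        else (st.1, st.2 ++ [cv.2])) (d, c)
    = (d + ((l1.length : Int) - (pvMatches l1 (l2.drop s)).length),
       c ++ pvMatches l1 (l2.drop s)) := by
  induction l1 generalizing s d c with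
  | nil =>
    simp [PySem.List.enumerate]
    cases l2.drop s <;> simp [pvMatches]
  | cons x xs ih =>
    have hs : s < l2.length := by simp at h; omega
    have hget : PySem.List.pyGetD l2 (s : Int) ' ' = l2[s] :=
      PySem.List.pyGetD_ofNat l2 s ' ' hs
    have hdrop : l2.drop s = l2[s] :: l2.drop (s + 1) := List.drop_eq_getElem_cons hs
    have hcast : ((s : Int) + 1) = ((s + 1 : Nat) : Int) := by push_cast; ring
    have hrec := fun d' c' => ih (s + 1) d' c' (by simp at h ⊢; omega)
    rw [PySem.List.enumerate_cons, List.foldl_cons, hcast]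
    simp only [hget, hdrop, pvMatches]
    by_cases hx : x = l2[s]
    · rw [if_neg (by simp [hx]), if_pos hx, hrec]
      simp only [Prod.mk.injEq]
      exact ⟨by push_cast [List.length_cons]; ring, by simp [hx]⟩
    · rw [if_pos hx, if_neg hx, hrec]
      simp only [Prod.mk.injEq]
      exact ⟨by push_cast [List.length_cons]; ring, trivial⟩

theorem pvMatches_nil (ys : List Char) : pvMatches [] ys = [] := by
  cases ys <;> rfl

-- pvMatches splits over an append of the first list
theorem pvMatches_append (a b ys : List Char) (h : a.length ≤ ys.length) :
    pvMatches (a ++ b) ys = pvMatches a ys ++ pvMatches b (ys.drop a.length) := by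
  induction a generalizing ys with
  | nil => simp [pvMatches]
  | cons x xs ih =>
    cases ys with
    | nil => simp at h
    | cons y t =>
      have ht : xs.length ≤ t.length := by simpa using h
      simp only [List.cons_append, pvMatches, ih t ht, List.length_cons, List.drop_succ_cons]
      by_cases hx : x = y <;> simp [hx]

-- B's solve on [lo, hi) computes ((hi-lo) - |M|, M) for M the matches of the segment
theorem pvSolve_eq (l1 l2 : List Char) (fuel lo hi : Nat)
    (hf : hi - lo ≤ fuel) (hlo : lo ≤ hi) (hhi : hi ≤ l1.length) (h : l1.length ≤ l2.length) :
    pvSolve l1 l2 fuel lo hi =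
      ((hi : Int) - lo - (pvMatches ((l1.drop lo).take (hi - lo)) (l2.drop lo)).length,
       pvMatches ((l1.drop lo).take (hi - lo)) (l2.drop lo)) := by
  induction fuel generalizing lo hi with
  | zero =>
    have : hi = lo := by omega
    subst this
    simp [pvSolve, pvMatches_nil]
  | succ fuel ih =>
    by_cases h0 : hi ≤ lo
    · have : hi = lo := by omega
      subst this
      rw [pvSolve, if_pos le_rfl]
      simp [pvMatches_nil]
    · by_cases h1 : hi = lo + 1
      · subst h1
        have hlt : lo < l1.length := by omega
        have hget1 : PySem.List.pyGetD l1 (lo : Int) ' ' = l1[lo] :=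
          PySem.List.pyGetD_ofNat l1 lo ' ' hlt
        have hget2 : PySem.List.pyGetD l2 (lo : Int) ' ' = l2[lo] :=
          PySem.List.pyGetD_ofNat l2 lo ' ' (by omega)
        have hd1 : l1.drop lo = l1[lo] :: l1.drop (lo + 1) := List.drop_eq_getElem_cons hlt
        have hd2 : l2.drop lo = l2[lo] :: l2.drop (lo + 1) := List.drop_eq_getElem_cons (by omega)
        rw [pvSolve, if_neg (by omega : ¬ lo + 1 ≤ lo), if_pos rfl]
        show (if PySem.List.pyGetD l1 (lo : Int) ' ' = PySem.List.pyGetD l2 (lo : Int) ' '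
                then ((0 : Int), [PySem.List.pyGetD l1 (lo : Int) ' ']) else (1, [])) = _
        rw [hget1, hget2]
        simp only [hd1, hd2, Nat.add_sub_cancel_left, List.take_succ_cons, List.take_zero,
          pvMatches]
        by_cases hx : l1[lo] = l2[lo] <;>
          simp [hx]
      · rw [pvSolve, if_neg h0, if_neg h1]
        have hmid1 : lo < (lo + hi) / 2 := by omega
        have hmid2 : (lo + hi) / 2 < hi := by omega
        have r1 := ih lo ((lo + hi) / 2) (by omega) (by omega) (by omega) 
        have r2 := ih ((lo + hi) / 2) hi (by omega) (by omega) hhi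
        show ((pvSolve l1 l2 fuel lo ((lo + hi) / 2)).1 + (pvSolve l1 l2 fuel ((lo + hi) / 2) hi).1,
              (pvSolve l1 l2 fuel lo ((lo + hi) / 2)).2 ++ (pvSolve l1 l2 fuel ((lo + hi) / 2) hi).2) = _
        rw [r1, r2]
        have hsplit : (l1.drop lo).take (hi - lo)
            = (l1.drop lo).take ((lo + hi) / 2 - lo)
              ++ ((l1.drop lo).drop ((lo + hi) / 2 - lo)).take (hi - (lo + hi) / 2) := by
          have : hi - lo = ((lo + hi) / 2 - lo) + (hi - (lo + hi) / 2) := by omega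
          rw [this, List.take_add]
        have hdd : (l1.drop lo).drop ((lo + hi) / 2 - lo) = l1.drop ((lo + hi) / 2) := by
          rw [List.drop_drop]; congr 1; omega
        have hdd2 : (l2.drop lo).drop ((lo + hi) / 2 - lo) = l2.drop ((lo + hi) / 2) := by
          rw [List.drop_drop]; congr 1; omega
        have hlen : ((l1.drop lo).take ((lo + hi) / 2 - lo)).length = (lo + hi) / 2 - lo := by
          simp; omega
        have happ := pvMatches_append ((l1.drop lo).take ((lo + hi) / 2 - lo))
            ((l1.drop ((lo + hi) / 2)).take (hi - (lo + hi) / 2)) (l2.drop lo)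
            (by simp [hlen]; omega)
        rw [hsplit, hdd, happ, hlen, hdd2]
        simp only [Prod.mk.injEq, List.length_append]
        refine ⟨by push_cast; ring_nf, trivial⟩

-- ===== VERDICT (by name: the statement is the Claim_ definition above) =====
theorem get_chardiff_spec : Claim_equal_get_chardiff := by
  intro v1 v2 _ hpre
  unfold Spec_get_chardiff get_chardiff get_chardiff_alt
  have hA := pvFoldA v1.toList v2.toList 0 0 [] (by simpa using hpre)
  have hB := pvSolve_eq v1.toList v2.toList v1.toList.length 0 v1.toList.length (by omega) (Nat.zero_le _) le_rfl hpre
  simp only [Nat.cast_zero] at hA hB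
  simp only [hA, hB]
  simp only [Nat.sub_zero, List.drop_zero, List.take_length, List.nil_append, zero_add,
    sub_zero]
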